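-- pv_equiv track=rewrite | github.com/JakeRezac/3D_Scanner | triangulation/delaunay_lib.py | same_triangle
-- ===== SOURCE A (Python) =====
-- def same_triangle(tri_1, tri_2):
-- 	# check to see if 2 triangles are the same regardless of vertex order
-- 	#
-- 	# each triangle is a thruple containing its 3 verticies
-- 	#	tri_1 = (v10, v11, v12)
-- 	#	tri_2 = (v20, v21, v22)
--
-- 	v10 = tri_1[0]
-- 	v11 = tri_1[1]
-- 	v12 = tri_1[2]
--
-- 	v20 = tri_2[0]
-- 	v21 = tri_2[1]
-- 	v22 = tri_2[2]
--
-- 	#Cycle each possible order of tri_1's verticies and compare to tri_2's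
-- 	for i in range(2):
-- 		for j in range(3):
-- 			if ( (v10 == v20) and (v11 == v21) and (v12 == v22) ):
-- 				return True
--
-- 			temp = v10
-- 			v10 = v11
-- 			v11 = v12
-- 			v12 = temp
--
-- 		temp = v11
-- 		v11 = v12
-- 		v12 = temp
--
-- 	return False
-- ===== SOURCE B (Python) =====
-- def same_triangle(tri_1, tri_2):
-- 	# B: compare the two vertex multisets directly instead of cycling
-- 	# through the 6 orderings of tri_1.
-- 	return sorted(tri_1) == sorted(tri_2)
-- ===== Notes on version B (the rewrite author's own statement) =====
-- stated objective: simpler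
-- what changed: Replaced the nested loop enumerating the 6 vertex orderings of tri_1 with a single multiset comparison sorted(tri_1) == sorted(tri_2).
import Mathlib
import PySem

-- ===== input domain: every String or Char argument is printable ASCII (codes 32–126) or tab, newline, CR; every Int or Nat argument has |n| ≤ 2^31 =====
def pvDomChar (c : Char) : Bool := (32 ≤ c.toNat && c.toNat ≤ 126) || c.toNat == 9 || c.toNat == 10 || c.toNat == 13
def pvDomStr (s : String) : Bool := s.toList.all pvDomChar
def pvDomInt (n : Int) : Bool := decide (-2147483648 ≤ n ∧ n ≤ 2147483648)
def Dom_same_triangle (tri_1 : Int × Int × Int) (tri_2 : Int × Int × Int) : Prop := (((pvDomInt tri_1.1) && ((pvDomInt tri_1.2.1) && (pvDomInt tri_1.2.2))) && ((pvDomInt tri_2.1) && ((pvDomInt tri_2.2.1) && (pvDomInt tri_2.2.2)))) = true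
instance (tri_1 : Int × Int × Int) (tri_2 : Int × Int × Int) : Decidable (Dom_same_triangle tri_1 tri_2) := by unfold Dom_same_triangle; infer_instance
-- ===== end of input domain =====

-- B replaces A's enumeration of the 6 vertex orderings with one sorted-multiset comparison (simpler; same result).

-- ===== PORT A =====
-- inner 'for j in range(3)' loop: checks equality, then cyclically rotates (v10,v11,v12);
-- 'none' models the early 'return True', 'some state' the fall-through with the final vertex state.
def innerLoop : Nat → Int → Int → Int → Int → Int → Int → Option (Int × Int × Int)
  | 0, v10, v11, v12, _, _, _ => some (v10, v11, v12)
  | n+1, v10, v11, v12, v20, v21, v22 =>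
    if v10 = v20 ∧ v11 = v21 ∧ v12 = v22 then none
    else innerLoop n v11 v12 v10 v20 v21 v22

-- outer 'for i in range(2)' loop: runs the inner loop, then swaps v11 and v12.
def outerLoop : Nat → Int → Int → Int → Int → Int → Int → Option (Int × Int × Int)
  | 0, v10, v11, v12, _, _, _ => some (v10, v11, v12)
  | n+1, v10, v11, v12, v20, v21, v22 =>
    match innerLoop 3 v10 v11 v12 v20 v21 v22 with
    | none => none
    | some (w10, w11, w12) => outerLoop n w10 w12 w11 v20 v21 v22

def same_triangle (tri_1 : Int × Int × Int) (tri_2 : Int × Int × Int) : Bool :=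
  match outerLoop 2 tri_1.1 tri_1.2.1 tri_1.2.2 tri_2.1 tri_2.2.1 tri_2.2.2 with
  | none => true      -- 'return True' was reached inside the loops
  | some _ => false   -- 'return False'

-- ===== PORT B =====
def same_triangle_alt (tri_1 : Int × Int × Int) (tri_2 : Int × Int × Int) : Bool :=
  PySem.List.sorted [tri_1.1, tri_1.2.1, tri_1.2.2] id false
    == PySem.List.sorted [tri_2.1, tri_2.2.1, tri_2.2.2] id false

-- ===== PRECONDITION & SPEC =====
def Spec_same_triangle (tri_1 : Int × Int × Int) (tri_2 : Int × Int × Int) (out : Bool) : Prop := out = same_triangle_alt tri_1 tri_2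
instance (tri_1 : Int × Int × Int) (tri_2 : Int × Int × Int) (out : Bool) : Decidable (Spec_same_triangle tri_1 tri_2 out) := by unfold Spec_same_triangle; infer_instance

-- ===== CLAIM (what is proved, stated in full; the proofs are below) =====
def Claim_equal_same_triangle : Prop := ∀ (tri_1 : Int × Int × Int) (tri_2 : Int × Int × Int), Dom_same_triangle tri_1 tri_2 → Spec_same_triangle tri_1 tri_2 (same_triangle tri_1 tri_2)

-- ===== LEMMAS AND PROOFS =====
-- Closed form of Python's sorted on a 3-element Int list (stable insertion sort).
theorem sorted3 (a b c : Int) : PySem.List.sorted [a,b,c] id false =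
    if b < a then (if c < b then [c,b,a] else if c < a then [b,c,a] else [b,a,c])
    else (if c < a then [c,a,b] else if c < b then [a,c,b] else [a,b,c]) := by
  simp only [PySem.List.sorted]
  unfold PySem.List.insertBy
  split_ifs <;> simp_all <;>
    (try unfold PySem.List.insertBy) <;> (try split_ifs) <;> (try simp_all) <;>
    (try unfold PySem.List.insertBy) <;> (try split_ifs) <;> (try simp_all) <;> omega

-- ===== VERDICT (by name: the statement is the Claim_ definition above) =====
set_option maxHeartbeats 2000000 in
theorem same_triangle_spec : Claim_equal_same_triangle := by
  intro t1 t2 _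
  unfold Spec_same_triangle
  obtain ⟨a, b, c⟩ := t1
  obtain ⟨d, e, f⟩ := t2
  simp only [same_triangle, same_triangle_alt, sorted3]
  simp only [outerLoop, innerLoop]
  split_ifs <;> simp_all <;> (try omega) <;> split_ifs <;> simp_all <;> omega
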